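-- pv_equiv track=rewrite | github.com/augustedupin123/python_practice | p_subarray1.py | nonnegativesubarray
-- ===== SOURCE A (Python) =====
-- def nonnegativesubarray(list1):
--     list2 = []
--     max1 = 0
--     for i in range(len(list1)):
--         count1 = 0
--         for j in range(i,len(list1)):
--             if(list1[j]>=0):
--                 count1+=1
--             else:
--                 break
--         list2.append(count1)
--
--     for k in range(len(list2)):
--         if(list2[k]>max1):
--             max1 = list2[k]
--     return (max1)
-- ===== SOURCE B (Python) =====
-- def nonnegativesubarray(list1):
--     best = 0
--     cur = 0
--     for x in list1:
--         cur = cur + 1 if x >= 0 else 0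
--         if cur > best:
--             best = cur
--     return best
-- ===== Notes on version B (the rewrite author's own statement) =====
-- stated objective: faster
-- what changed: replaced the quadratic run-length-per-start scan plus a separate max pass by a single pass that counts the current run of non-negatives and tracks the maximum
import Mathlib
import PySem

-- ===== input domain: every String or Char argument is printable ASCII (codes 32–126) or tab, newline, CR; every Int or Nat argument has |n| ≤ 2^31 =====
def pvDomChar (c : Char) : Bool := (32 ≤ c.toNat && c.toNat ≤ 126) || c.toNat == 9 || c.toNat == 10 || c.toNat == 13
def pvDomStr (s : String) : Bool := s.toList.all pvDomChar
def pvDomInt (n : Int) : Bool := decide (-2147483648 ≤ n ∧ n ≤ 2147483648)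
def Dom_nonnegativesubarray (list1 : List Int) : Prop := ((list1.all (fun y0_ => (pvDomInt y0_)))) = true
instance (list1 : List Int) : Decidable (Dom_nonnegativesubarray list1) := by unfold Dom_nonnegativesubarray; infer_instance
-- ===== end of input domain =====

-- B replaces A's quadratic per-start run-length scan (plus separate max pass) by one
-- linear pass counting the current non-negative run and tracking the maximum.

-- ===== PORT A =====
-- inner loop 'for j in range(i, len(list1)): if list1[j] >= 0: count1 += 1 else: break'
def pvInnerA (list1 : List Int) (js : List Int) (count1 : Int) : Int :=
  match js with
  | [] => count1
  | j :: rest =>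
      if PySem.List.pyGetD list1 j 0 ≥ 0 then pvInnerA list1 rest (count1 + 1)
      else count1

def nonnegativesubarray (list1 : List Int) : Int :=
  let n : Int := list1.length
  let list2 : List Int :=
    (PySem.List.pyRange 0 n 1).foldl
      (fun list2 i => list2 ++ [pvInnerA list1 (PySem.List.pyRange i n 1) 0]) []
  (PySem.List.pyRange 0 (list2.length : Int) 1).foldl
    (fun max1 k =>
      if PySem.List.pyGetD list2 k 0 > max1 then PySem.List.pyGetD list2 k 0 else max1) 0

-- ===== PORT B =====
def pvScanB (xs : List Int) (cur best : Int) : Int :=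
  match xs with
  | [] => best
  | x :: t =>
      let cur' := if x ≥ 0 then cur + 1 else 0
      pvScanB t cur' (if cur' > best then cur' else best)

def nonnegativesubarray_alt (list1 : List Int) : Int :=
  pvScanB list1 0 0

-- ===== PRECONDITION & SPEC =====
def Spec_nonnegativesubarray (list1 : List Int) (out : Int) : Prop := out = nonnegativesubarray_alt list1
instance (list1 : List Int) (out : Int) : Decidable (Spec_nonnegativesubarray list1 out) := by unfold Spec_nonnegativesubarray; infer_instance

-- ===== CLAIM (what is proved, stated in full; the proofs are below) =====
def Claim_equal_nonnegativesubarray : Prop := ∀ (list1 : List Int), Dom_nonnegativesubarray list1 → Spec_nonnegativesubarray list1 (nonnegativesubarray list1)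

-- ===== LEMMAS AND PROOFS =====

-- length of the initial run of non-negatives
def pvRunlen : List Int → Int
  | [] => 0
  | x :: t => if x ≥ 0 then pvRunlen t + 1 else 0

-- maximum over all suffixes of pvRunlen
def pvMaxRun : List Int → Int
  | [] => 0
  | x :: t => max (pvRunlen (x :: t)) (pvMaxRun t)

lemma pvRunlen_nonneg (l : List Int) : 0 ≤ pvRunlen l := by
  induction l with
  | nil => simp [pvRunlen]
  | cons x t ih => simp only [pvRunlen]; split <;> omega

lemma pvMaxRun_nonneg (l : List Int) : 0 ≤ pvMaxRun l := by
  cases l with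
  | nil => simp [pvMaxRun]
  | cons x t => simp only [pvMaxRun]; have := pvRunlen_nonneg (x :: t); omega

lemma pvRunlen_le_maxRun (l : List Int) : pvRunlen l ≤ pvMaxRun l := by
  cases l with
  | nil => simp [pvMaxRun, pvRunlen]
  | cons x t => simp [pvMaxRun]

-- A's inner loop computes the run length starting at index i
lemma pvInnerA_eq (l : List Int) (i : Int) (c : Int) (hi : 0 ≤ i) :
    pvInnerA l (PySem.List.pyRange i (l.length : Int) 1) c = c + pvRunlen (l.drop i.toNat) := by
  by_cases h : i < (l.length : Int)
  · have hlt : i.toNat < l.length := by omega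
    rw [PySem.List.pyRange_one_cons h]
    rw [List.drop_eq_getElem_cons hlt]
    have hget : PySem.List.pyGetD l i 0 = l[i.toNat] :=
      PySem.List.pyGetD_eq_getElem l 0 hi h
    simp only [pvInnerA, pvRunlen, hget]
    by_cases hx : l[i.toNat] ≥ 0
    · simp only [hx, if_pos]
      have := pvInnerA_eq l (i + 1) (c + 1) (by omega)
      rw [this]
      have : (i + 1).toNat = i.toNat + 1 := by omega
      rw [this]; ring
    · simp [hx]
  · rw [PySem.List.pyRange_one_eq_nil (by omega)]
    rw [List.drop_eq_nil_of_le (by omega)]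
    simp [pvInnerA, pvRunlen]
termination_by (l.length - i.toNat)
decreasing_by omega

lemma foldl_max_shift (xs : List Int) (a b : Int) :
    xs.foldl max (max a b) = max a (xs.foldl max b) := by
  induction xs generalizing b with
  | nil => simp
  | cons x t ih => simp only [List.foldl_cons, max_assoc]; exact ih _

lemma foldl_max_range_drop (l : List Int) :
    ((List.range l.length).map (fun k => pvRunlen (l.drop k))).foldl max 0 = pvMaxRun l := by
  induction l with
  | nil => simp [pvMaxRun]
  | cons x t ih =>
    rw [List.length_cons, List.range_succ_eq_map]
    simp only [List.map_cons, List.map_map, List.foldl_cons, List.drop_zero]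
    have h1 : max 0 (pvRunlen (x :: t)) = max (pvRunlen (x :: t)) 0 := max_comm _ _
    rw [h1, foldl_max_shift]
    have h2 : (List.map ((fun k => pvRunlen ((x :: t).drop k)) ∘ fun n => n + 1) (List.range t.length))
        = List.map (fun k => pvRunlen (t.drop k)) (List.range t.length) := by
      simp [Function.comp]
    rw [h2, ih, pvMaxRun]

-- B's scan with accumulator characterised by pvG
def pvG : Int → List Int → Int
  | cur, [] => cur
  | cur, x :: t => max cur (pvG (if x ≥ 0 then cur + 1 else 0) t)

lemma le_pvG (cur : Int) (xs : List Int) : cur ≤ pvG cur xs := by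
  cases xs with
  | nil => simp [pvG]
  | cons x t => simp [pvG]

lemma pvScanB_eq (xs : List Int) (cur best : Int) (h : cur ≤ best) :
    pvScanB xs cur best = max best (pvG cur xs) := by
  induction xs generalizing cur best with
  | nil => simp [pvScanB, pvG]; omega
  | cons x t ih =>
    simp only [pvScanB, pvG]
    set cur' := if x ≥ 0 then cur + 1 else 0 with hc
    have hb : (if cur' > best then cur' else best) = max best cur' := by
      split <;> omega
    rw [hb, ih cur' (max best cur') (le_max_right _ _)]
    have h1 := le_pvG cur' t
    have h2 := le_max_left best cur'
    omega

lemma pvG_eq (xs : List Int) (cur : Int) (h : 0 ≤ cur) :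
    pvG cur xs = max (cur + pvRunlen xs) (pvMaxRun xs) := by
  induction xs generalizing cur with
  | nil => simp [pvG, pvRunlen, pvMaxRun]; omega
  | cons x t ih =>
    simp only [pvG, pvRunlen, pvMaxRun]
    by_cases hx : x ≥ 0
    · simp only [hx, if_pos]
      rw [ih (cur + 1) (by omega)]
      have := pvRunlen_nonneg t
      have := pvMaxRun_nonneg t
      omega
    · simp only [hx, if_false]
      rw [ih 0 le_rfl]
      have := pvRunlen_le_maxRun t
      have := pvMaxRun_nonneg t
      simp only [not_le] at hx
      omega

lemma alt_eq_maxRun (l : List Int) : nonnegativesubarray_alt l = pvMaxRun l := by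
  unfold nonnegativesubarray_alt
  rw [pvScanB_eq l 0 0 le_rfl, pvG_eq l 0 le_rfl]
  have := pvRunlen_le_maxRun l
  have := pvMaxRun_nonneg l
  omega

lemma a_eq_maxRun (l : List Int) : nonnegativesubarray l = pvMaxRun l := by
  unfold nonnegativesubarray
  simp only [PySem.List.foldl_append_singleton_eq_map]
  rw [PySem.List.foldl_pyRange_zero_pyGetD'
    (f := fun (max1 v : Int) => if v > max1 then v else max1)]
  have hmap : (PySem.List.pyRange 0 (l.length : Int) 1).map
      (fun i => pvInnerA l (PySem.List.pyRange i (l.length : Int) 1) 0)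
      = (List.range l.length).map (fun k => pvRunlen (l.drop k)) := by
    rw [PySem.List.pyRange_one]
    simp only [List.map_map, Int.sub_zero, Int.toNat_natCast]
    apply List.map_congr_left
    intro k hk
    simp only [Function.comp]
    rw [pvInnerA_eq l (0 + (k : Int)) 0 (by omega)]
    simp
  rw [hmap, List.nil_append]
  have hfold : ∀ (init : Int) (xs : List Int),
      xs.foldl (fun max1 v => if v > max1 then v else max1) init = xs.foldl max init := by
    intro init xs
    induction xs generalizing init with
    | nil => rfl
    | cons y t ih =>
      simp only [List.foldl_cons]
      have : (if y > init then y else init) = max init y := by split <;> omega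
      rw [this, ih]
  rw [hfold, foldl_max_range_drop]

-- ===== VERDICT (by name: the statement is the Claim_ definition above) =====
theorem nonnegativesubarray_spec : Claim_equal_nonnegativesubarray := by
  intro l _
  unfold Spec_nonnegativesubarray
  rw [alt_eq_maxRun, a_eq_maxRun]
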